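-- pv_equiv track=rewrite | github.com/Poolesville-Computer-Team/phsco-winter25 | problems/H/gpt.py | evaluate_with_precedence
-- ===== SOURCE A (Python) =====
-- def evaluate_with_precedence(bits, a, b):
--     """
--     Evaluate the bitstring using fixed precedence: ANDs first, then ORs.
--     """
--     # Step 1: Collapse all ANDs
--     collapsed_bits = []
--     i = 0
--     while i < len(bits):
--         if i + 1 < len(bits) and a > 0:
--             # Apply AND
--             collapsed_bits.append(bits[i] & bits[i + 1])
--             i += 2  # Skip the next bit (already used)
--             a -= 1
--         else:
--             # No AND applied
--             collapsed_bits.append(bits[i])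
--             i += 1
--
--     # Step 2: Collapse all ORs
--     result = collapsed_bits[0]
--     for j in range(1, len(collapsed_bits)):
--         if b > 0:
--             result |= collapsed_bits[j]
--             b -= 1
--
--     return result
-- ===== SOURCE B (Python) =====
-- def evaluate_with_precedence(bits, a, b):
--     # Single fused pass with early exit: no intermediate collapsed list is built;
--     # the loop stops as soon as the OR budget b is exhausted.
--     if a > 0 and len(bits) >= 2:
--         result = bits[0] & bits[1]
--         i, a = 2, a - 1
--     else:
--         result = bits[0]
--         i = 1
--     while i < len(bits) and b > 0:
--         if a > 0 and i + 1 < len(bits):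
--             result |= bits[i] & bits[i + 1]
--             i += 2
--             a -= 1
--         else:
--             result |= bits[i]
--             i += 1
--         b -= 1
--     return result
-- ===== Notes on version B (the rewrite author's own statement) =====
-- stated objective: alternative
-- what changed: Replaces A's two staged passes (build the full collapsed list, then OR over it with a budget) by one fused pass over bits that never materializes an intermediate list and exits early the moment the OR budget b is exhausted.
-- outside the precondition, e.g. on evaluate_with_precedence([], 0, 0): A raises IndexError, B raises IndexError
import Mathlib
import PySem

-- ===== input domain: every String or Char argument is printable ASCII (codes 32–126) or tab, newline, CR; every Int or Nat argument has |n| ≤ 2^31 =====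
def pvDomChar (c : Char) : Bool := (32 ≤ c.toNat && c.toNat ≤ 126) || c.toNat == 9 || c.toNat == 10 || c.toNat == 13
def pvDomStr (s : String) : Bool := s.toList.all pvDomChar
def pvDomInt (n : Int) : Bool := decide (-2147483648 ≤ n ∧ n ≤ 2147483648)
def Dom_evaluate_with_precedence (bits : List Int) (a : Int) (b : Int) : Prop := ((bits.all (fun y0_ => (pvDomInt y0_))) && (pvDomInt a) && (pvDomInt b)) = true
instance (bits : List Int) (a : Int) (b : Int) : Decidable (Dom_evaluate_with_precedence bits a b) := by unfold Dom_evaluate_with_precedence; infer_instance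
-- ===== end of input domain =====

-- B fuses A's two staged passes into one early-exiting pass with no intermediate list; objective: alternative.

-- ===== PORT A =====
-- while loop of step 1: state (i, a); recursion on the remaining suffix of bits
def pvCollapseA (bits : List Int) (a : Int) : List Int :=
  match bits with
  | [] => []
  | [x] => [x]
  | x :: y :: rest =>
    if a > 0 then PySem.Int.band x y :: pvCollapseA rest (a - 1)
    else x :: pvCollapseA (y :: rest) a
  termination_by bits.length

-- for loop of step 2: state (result, b)
def pvOrA (r : Int) (b : Int) (l : List Int) : Int :=
  match l with
  | [] => r
  | x :: xs => if b > 0 then pvOrA (PySem.Int.bor r x) (b - 1) xs else pvOrA r b xs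

def evaluate_with_precedence (bits : List Int) (a : Int) (b : Int) : Int :=
  match pvCollapseA bits a with
  | [] => 0      -- collapsed_bits[0] raises IndexError in Python (only when bits = []); excluded by Pre_
  | r :: rest => pvOrA r b rest

-- ===== PORT B =====
-- Source B's while loop: state (remaining suffix, a, b, result); exits as soon as b ≤ 0
def pvFusedB (l : List Int) (a : Int) (b : Int) (r : Int) : Int :=
  match l with
  | [] => r
  | x :: rest =>
    if b > 0 then
      if a > 0 then
        match rest with
        | y :: rest' => pvFusedB rest' (a - 1) (b - 1) (PySem.Int.bor r (PySem.Int.band x y))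
        | [] => PySem.Int.bor r x   -- i + 1 < len fails: OR in x, then the loop ends
      else pvFusedB rest a (b - 1) (PySem.Int.bor r x)
    else r
  termination_by l.length

def evaluate_with_precedence_alt (bits : List Int) (a : Int) (b : Int) : Int :=
  match bits with
  | [] => 0      -- bits[0] raises IndexError in Python; excluded by Pre_
  | [x] => pvFusedB [] a b x
  | x :: y :: rest =>
    if a > 0 then pvFusedB rest (a - 1) b (PySem.Int.band x y)
    else pvFusedB (y :: rest) a b x

-- ===== PRECONDITION & SPEC =====
-- Pre_ excludes exactly bits = [], on which both Pythons raise IndexError (A at collapsed_bits[0], B at bits[0])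
def Pre_evaluate_with_precedence (bits : List Int) (a : Int) (b : Int) : Prop := bits ≠ []
instance (bits : List Int) (a : Int) (b : Int) : Decidable (Pre_evaluate_with_precedence bits a b) := by unfold Pre_evaluate_with_precedence; infer_instance
def pvWitness_evaluate_with_precedence : List Int × Int × Int := ([1, 0, 1], 1, 1)
def Spec_evaluate_with_precedence (bits : List Int) (a : Int) (b : Int) (out : Int) : Prop := out = evaluate_with_precedence_alt bits a b
instance (bits : List Int) (a : Int) (b : Int) (out : Int) : Decidable (Spec_evaluate_with_precedence bits a b out) := by unfold Spec_evaluate_with_precedence; infer_instance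

-- ===== CLAIM =====
def Claim_equal_evaluate_with_precedence : Prop := ∀ (bits : List Int) (a : Int) (b : Int), Dom_evaluate_with_precedence bits a b → Pre_evaluate_with_precedence bits a b → Spec_evaluate_with_precedence bits a b (evaluate_with_precedence bits a b)

-- ===== LEMMAS AND PROOFS =====

theorem pvCollapseA_nonpos (bits : List Int) (a : Int) (h : a ≤ 0) :
    pvCollapseA bits a = bits := by
  match bits with
  | [] => simp [pvCollapseA]
  | [x] => simp [pvCollapseA]
  | x :: y :: rest =>
    rw [pvCollapseA]
    simp only [if_neg (by omega : ¬ a > 0)]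
    rw [pvCollapseA_nonpos (y :: rest) a h]

theorem pvOrA_nonpos (l : List Int) (r : Int) (b : Int) (h : ¬ b > 0) :
    pvOrA r b l = r := by
  induction l with
  | nil => rfl
  | cons x xs ih => rw [pvOrA, if_neg h]; exact ih

-- the fused pass of B computes exactly A's OR loop applied to A's collapsed list
theorem pvFusedB_eq (l : List Int) (a : Int) (b : Int) (r : Int) :
    pvFusedB l a b r = pvOrA r b (pvCollapseA l a) := by
  match l with
  | [] => simp [pvFusedB, pvCollapseA, pvOrA]
  | [x] =>
    rw [pvFusedB]
    by_cases hb : b > 0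
    · rw [if_pos hb]
      by_cases ha : a > 0
      · simp [pvCollapseA, pvOrA, pvFusedB, ha, hb]
      · simp [pvCollapseA, pvOrA, pvFusedB, ha, hb]
    · rw [if_neg hb, pvCollapseA]
      exact (pvOrA_nonpos _ _ _ hb).symm
  | x :: y :: rest =>
    rw [pvFusedB]
    by_cases hb : b > 0
    · rw [if_pos hb]
      by_cases ha : a > 0
      · rw [if_pos ha, pvCollapseA, if_pos ha, pvOrA, if_pos hb]
        exact pvFusedB_eq rest (a - 1) (b - 1) (PySem.Int.bor r (PySem.Int.band x y))
      · rw [if_neg ha, pvCollapseA, if_neg ha, pvOrA, if_pos hb]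
        exact pvFusedB_eq (y :: rest) a (b - 1) (PySem.Int.bor r x)
    · rw [if_neg hb]
      exact (pvOrA_nonpos _ _ _ hb).symm
  termination_by l.length

-- ===== VERDICT =====
theorem evaluate_with_precedence_spec : Claim_equal_evaluate_with_precedence := by
  intro bits a b _ hpre
  unfold Spec_evaluate_with_precedence evaluate_with_precedence evaluate_with_precedence_alt
  match bits with
  | [] => exact absurd rfl hpre
  | [x] =>
    dsimp only
    rw [pvFusedB_eq]
    simp [pvCollapseA]
  | x :: y :: rest =>
    dsimp only
    rw [pvCollapseA]
    by_cases ha : a > 0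
    · rw [if_pos ha, if_pos ha]
      dsimp only
      rw [pvFusedB_eq]
    · rw [if_neg ha, if_neg ha]
      dsimp only
      rw [pvFusedB_eq]
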